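-- pv_equiv track=rewrite | github.com/karan5719/sanskrit-sandhi-pos-tagger | src/bilstm_sandhi.py | _decode_splits
-- ===== SOURCE A (Python) =====
-- from typing import List, Tuple, Dict, Optional
--
-- def _decode_splits(word: str, split_positions: List[int]) -> List[str]:
--     """Decode split positions into word parts."""
--     if not split_positions:
--         return [word]
--
--     # Sort positions and ensure they're within word bounds
--     split_positions = sorted([pos for pos in split_positions if 0 < pos < len(word)])
--
--     if not split_positions:
--         return [word]
--
--     parts = []
--     start = 0
--
--     for pos in split_positions:
--         if pos > start:
--             parts.append(word[start:pos])
--             start = pos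
--
--     # Add remaining part
--     if start < len(word):
--         parts.append(word[start:])
--
--     return parts if parts else [word]
-- ===== SOURCE B (Python) =====
-- def _decode_splits(word, split_positions):
--     """Recursive decomposition: peel off the part after the largest valid cut,
--     recurse on the shrinking prefix. No sorting; output built back-to-front."""
--     cuts = [p for p in split_positions if 0 < p < len(word)]
--     if not cuts:
--         return [word]
--     c = max(cuts)
--     return _decode_splits(word[:c], [p for p in cuts if p < c]) + [word[c:]]
-- ===== Notes on version B (the rewrite author's own statement) =====
-- stated objective: alternative
-- what changed: Replaces sort-then-forward-scan with a running start index by an unsorted recursive decomposition: repeatedly take the MAXIMUM valid cut, split off the suffix, and recurse on the prefix string with the smaller cuts, building the parts back-to-front (duplicates vanish because equal cuts are dropped by the strict p < c filter).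
import Mathlib
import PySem

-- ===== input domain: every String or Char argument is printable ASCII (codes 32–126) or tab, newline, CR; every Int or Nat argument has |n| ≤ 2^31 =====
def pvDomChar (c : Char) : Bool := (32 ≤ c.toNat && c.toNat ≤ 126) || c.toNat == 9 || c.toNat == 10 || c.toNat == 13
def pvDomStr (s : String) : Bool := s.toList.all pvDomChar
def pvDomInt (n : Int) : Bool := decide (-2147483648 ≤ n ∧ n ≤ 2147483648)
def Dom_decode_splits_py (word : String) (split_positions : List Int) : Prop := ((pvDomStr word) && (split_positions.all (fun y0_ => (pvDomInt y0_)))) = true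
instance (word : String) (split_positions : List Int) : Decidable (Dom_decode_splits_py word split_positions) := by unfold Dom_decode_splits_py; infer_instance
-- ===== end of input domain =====

-- B replaces A's sort-then-forward-scan by a recursive decomposition: take the largest valid
-- cut, split off the suffix, recurse on the prefix (no sorting, output built back-to-front).

-- ===== PORT A =====
def decode_splits_py (word : String) (split_positions : List Int) : List String :=
  if split_positions = [] then [word]
  else
    let sps := PySem.List.sorted
      (split_positions.filter (fun pos => decide (0 < pos) && decide (pos < PySem.Str.len word))) id
    if sps = [] then [word]
    else
      let st := sps.foldl (fun (acc : List String × Int) pos =>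
        if acc.2 < pos then (acc.1 ++ [PySem.Str.slice word (some acc.2) (some pos)], pos) else acc)
        ([], 0)
      let parts := if st.2 < PySem.Str.len word
        then st.1 ++ [PySem.Str.slice word (some st.2) none] else st.1
      if parts = [] then [word] else parts

-- ===== PORT B =====
def decode_splits_py_alt (word : String) (split_positions : List Int) : List String :=
  let cuts := split_positions.filter (fun p => decide (0 < p) && decide (p < PySem.Str.len word))
  match h : PySem.List.max? cuts (fun x => x) with
  | none => [word]
  | some c =>
      decode_splits_py_alt (PySem.Str.slice word none (some c))
          (cuts.filter (fun p => decide (p < c)))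
        ++ [PySem.Str.slice word (some c) none]
termination_by split_positions.length
decreasing_by
  have hc : c ∈ cuts := PySem.List.max?_mem h
  refine lt_of_lt_of_le (List.length_filter_lt_length_iff_exists.mpr ⟨c, hc, by simp⟩) ?_
  simpa using List.length_filter_le _ split_positions.attach

-- ===== PRECONDITION & SPEC =====
def Spec_decode_splits_py (word : String) (split_positions : List Int) (out : List String) : Prop := out = decode_splits_py_alt word split_positions
instance (word : String) (split_positions : List Int) (out : List String) : Decidable (Spec_decode_splits_py word split_positions out) := by unfold Spec_decode_splits_py; infer_instance

-- ===== CLAIM (what is proved, stated in full; the proofs are below) =====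
def Claim_equal_decode_splits_py : Prop := ∀ (word : String) (split_positions : List Int), Dom_decode_splits_py word split_positions → Spec_decode_splits_py word split_positions (decode_splits_py word split_positions)

-- ===== LEMMAS AND PROOFS =====

-- the strictly increasing subsequence A's `pos > start` guard actually keeps
def scCuts (s : Int) : List Int → List Int
  | [] => []
  | p :: rest => if s < p then p :: scCuts p rest else scCuts s rest

-- the parts delimited by boundaries s, c₁, …, c_k, end-of-word
def gParts (word : String) (s : Int) : List Int → List String
  | [] => [PySem.Str.slice word (some s) none]
  | c :: cs => PySem.Str.slice word (some s) (some c) :: gParts word c cs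

theorem gParts_ne_nil (word : String) (s : Int) (cs : List Int) : gParts word s cs ≠ [] := by
  cases cs <;> simp [gParts]

theorem mem_scCuts (L : List Int) : ∀ (s x : Int), L.Pairwise (· ≤ ·) →
    (x ∈ scCuts s L ↔ x ∈ L ∧ s < x) := by
  induction L with
  | nil => simp [scCuts]
  | cons p rest ih =>
    intro s x hp
    rw [List.pairwise_cons] at hp
    by_cases h : s < p
    · simp only [scCuts, if_pos h, List.mem_cons, ih p x hp.2]
      constructor
      · rintro (rfl | ⟨hx, hpx⟩)
        · exact ⟨Or.inl rfl, h⟩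
        · exact ⟨Or.inr hx, lt_trans h hpx⟩
      · rintro ⟨rfl | hx, hs⟩
        · exact Or.inl rfl
        · rcases lt_or_eq_of_le (hp.1 x hx) with hlt | rfl
          · exact Or.inr ⟨hx, hlt⟩
          · exact Or.inl rfl
    · simp only [scCuts, if_neg h, List.mem_cons, ih s x hp.2]
      constructor
      · rintro ⟨hx, hs⟩; exact ⟨Or.inr hx, hs⟩
      · rintro ⟨rfl | hx, hs⟩
        · exact absurd hs h
        · exact ⟨hx, hs⟩

theorem pairwise_lt_scCuts (L : List Int) : ∀ (s : Int), L.Pairwise (· ≤ ·) →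
    (scCuts s L).Pairwise (· < ·) := by
  induction L with
  | nil => intro s _; simp [scCuts]
  | cons p rest ih =>
    intro s hp
    rw [List.pairwise_cons] at hp
    by_cases h : s < p
    · simp only [scCuts, if_pos h]
      refine List.pairwise_cons.2 ⟨?_, ih p hp.2⟩
      intro q hq
      exact ((mem_scCuts rest p q hp.2).1 hq).2
    · simpa [scCuts, if_neg h] using ih s hp.2

-- two strictly increasing Int lists with the same members are equal
theorem chain_uniq (L1 L2 : List Int) (h1 : L1.Pairwise (· < ·)) (h2 : L2.Pairwise (· < ·))
    (hm : ∀ x, x ∈ L1 ↔ x ∈ L2) : L1 = L2 := by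
  exact ((List.perm_ext_iff_of_nodup h1.nodup h2.nodup).2 hm).eq_of_pairwise
    (fun a b _ _ hab hba => absurd hba (lt_asymm hab)) h1 h2

-- A's loop (plus its trailing-remainder step) produces exactly the parts at scCuts
theorem loopA_eq (word : String) (L : List Int) : ∀ (s : Int) (parts : List String),
    (∀ p ∈ L, p < PySem.Str.len word) → s < PySem.Str.len word →
    (if (L.foldl (fun (acc : List String × Int) pos =>
        if acc.2 < pos then (acc.1 ++ [PySem.Str.slice word (some acc.2) (some pos)], pos) else acc)
        (parts, s)).2 < PySem.Str.len word
       then (L.foldl (fun (acc : List String × Int) pos =>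
        if acc.2 < pos then (acc.1 ++ [PySem.Str.slice word (some acc.2) (some pos)], pos) else acc)
        (parts, s)).1 ++ [PySem.Str.slice word (some ((L.foldl (fun (acc : List String × Int) pos =>
        if acc.2 < pos then (acc.1 ++ [PySem.Str.slice word (some acc.2) (some pos)], pos) else acc)
        (parts, s)).2)) none]
       else (L.foldl (fun (acc : List String × Int) pos =>
        if acc.2 < pos then (acc.1 ++ [PySem.Str.slice word (some acc.2) (some pos)], pos) else acc)
        (parts, s)).1)
    = parts ++ gParts word s (scCuts s L) := by
  induction L with
  | nil =>
    intro s parts _ hs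
    simp only [List.foldl_nil]
    rw [if_pos hs]
    simp [gParts, scCuts]
  | cons p rest ih =>
    intro s parts hmem hs
    by_cases h : s < p
    · simp only [List.foldl_cons, scCuts, gParts, if_pos h]
      rw [ih p (parts ++ [PySem.Str.slice word (some s) (some p)])
            (fun q hq => hmem q (List.mem_cons_of_mem _ hq))
            (hmem p (List.mem_cons_self))]
      simp
    · simp only [List.foldl_cons, scCuts, if_neg h]
      exact ih s parts (fun q hq => hmem q (List.mem_cons_of_mem _ hq)) hs

theorem sorted_eq_nil_iff (F : List Int) : PySem.List.sorted F id = [] ↔ F = [] := by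
  constructor <;> intro h <;> rw [List.eq_nil_iff_forall_not_mem] <;> intro x hx
  · have hx' := (PySem.List.mem_sorted F id false x).2 hx
    rw [h] at hx'
    exact absurd hx' (List.not_mem_nil)
  · have hx' := (PySem.List.mem_sorted F id false x).1 hx
    rw [h] at hx'
    exact absurd hx' (List.not_mem_nil)

-- slicing inside a prefix = slicing the original word
theorem slice_prefix_slice (word : String) (a b c : Int) (ha : 0 ≤ a) (hb : 0 ≤ b) (hbc : b ≤ c) :
    PySem.Str.slice (PySem.Str.slice word none (some c)) (some a) (some b)
      = PySem.Str.slice word (some a) (some b) := by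
  apply String.toList_inj.mp
  simp only [PySem.Str.toList_slice, PySem.Chars.slice_eq_listSlice]
  rw [PySem.List.slice_to _ (le_trans hb hbc), PySem.List.slice_toNat _ ha hb,
      PySem.List.slice_toNat _ ha hb, List.drop_take, List.take_take]
  congr 1
  omega

theorem slice_prefix_rest (word : String) (s c : Int) (hs : 0 ≤ s) (hc : 0 ≤ c) :
    PySem.Str.slice (PySem.Str.slice word none (some c)) (some s) none
      = PySem.Str.slice word (some s) (some c) := by
  apply String.toList_inj.mp
  simp only [PySem.Str.toList_slice, PySem.Chars.slice_eq_listSlice]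
  rw [PySem.List.slice_to _ hc, PySem.List.slice_from _ hs, PySem.List.slice_toNat _ hs hc,
      List.drop_take]

theorem gParts_prefix (word : String) (c : Int) (hc : 0 ≤ c) :
    ∀ (C : List Int) (s : Int), 0 ≤ s →
    (∀ x ∈ C, 0 ≤ x ∧ x ≤ c) →
    gParts (PySem.Str.slice word none (some c)) s C ++ [PySem.Str.slice word (some c) none]
      = gParts word s (C ++ [c]) := by
  intro C
  induction C with
  | nil =>
    intro s hs _
    simp only [gParts, List.nil_append, List.singleton_append]
    rw [slice_prefix_rest word s c hs hc]
  | cons a cs ih =>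
    intro s hs hmem
    have ha := hmem a (List.mem_cons_self)
    simp only [gParts, List.cons_append]
    rw [slice_prefix_slice word s a c hs ha.1 ha.2,
        ih a ha.1 (fun x hx => hmem x (List.mem_cons_of_mem _ hx))]

theorem len_slice_prefix (word : String) (c : Int) (hc : 0 ≤ c)
    (hcl : c ≤ PySem.Str.len word) :
    (PySem.Str.len (PySem.Str.slice word none (some c)) : Int) = c := by
  simp only [PySem.Str.len_eq, PySem.Str.toList_slice, PySem.Chars.slice_eq_listSlice] at *
  rw [PySem.List.slice_to _ hc, List.length_take]
  omega

theorem slice_zero_none (s : String) : PySem.Str.slice s (some 0) none = s := by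
  apply String.toList_inj.mp
  simp only [PySem.Str.toList_slice, PySem.Chars.slice_eq_listSlice,
    PySem.List.slice_zero_start, PySem.List.slice_none_none]

-- B computes the parts at the strictly increasing deduped valid cuts
theorem Bchar (sp : List Int) : ∀ (word : String),
    decode_splits_py_alt word sp =
      (if sp.filter (fun p => decide (0 < p) && decide (p < PySem.Str.len word)) = []
       then [word]
       else gParts word 0 (scCuts 0 (PySem.List.sorted
         (sp.filter (fun p => decide (0 < p) && decide (p < PySem.Str.len word))) id))) := by
  induction hN : sp.length using Nat.strong_induction_on generalizing sp with
  | _ N ih => ?_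
  intro word
  rw [decode_splits_py_alt.eq_def]
  set F := sp.filter (fun p => decide (0 < p) && decide (p < PySem.Str.len word)) with hFdef
  split
  next hFnil =>
      rw [hFnil]
      rfl
  next hFne =>
      change (match h : PySem.List.max? F fun x => x with
        | none => [word]
        | some c =>
          decode_splits_py_alt (PySem.Str.slice word none (some c))
              (List.filter (fun p => decide (p < c)) F) ++
            [PySem.Str.slice word (some c) none]) = _
      split
      next hmax => exact absurd ((PySem.List.max?_eq_none_iff _ _).mp hmax) hFne
      next c hmax =>
      have hcF : c ∈ F := PySem.List.max?_mem hmax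
      have hcmax : ∀ p ∈ F, p ≤ c := fun p hp => PySem.List.max?_isMax hmax p hp
      have hFpos : ∀ p ∈ F, 0 < p := by
        intro p hp; rw [hFdef, List.mem_filter] at hp
        have := hp.2; simp only [Bool.and_eq_true, decide_eq_true_eq] at this; exact this.1
      have hFlt : ∀ p ∈ F, p < (PySem.Str.len word : Int) := by
        intro p hp; rw [hFdef, List.mem_filter] at hp
        have := hp.2; simp only [Bool.and_eq_true, decide_eq_true_eq] at this; exact this.2
      have hc0 : 0 < c := hFpos c hcF
      have hclen : c < (PySem.Str.len word : Int) := hFlt c hcF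
      have hlen' : (F.filter (fun p => decide (p < c))).length < N := by
        have h1 : (F.filter (fun p => decide (p < c))).length < F.length :=
          List.length_filter_lt_length_iff_exists.mpr ⟨c, hcF, by simp⟩
        have h2 : F.length ≤ sp.length := List.length_filter_le _ _
        omega
      have hrec := ih _ hlen' (F.filter (fun p => decide (p < c))) rfl
        (PySem.Str.slice word none (some c))
      have hlenpre : (PySem.Str.len (PySem.Str.slice word none (some c)) : Int) = c :=
        len_slice_prefix word c (le_of_lt hc0) (le_of_lt hclen)
      have hmemF' : ∀ p ∈ F.filter (fun p => decide (p < c)), 0 < p ∧ p < c := by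
        intro p hp
        rw [List.mem_filter] at hp
        exact ⟨hFpos p hp.1, by simpa using hp.2⟩
      have hG : (F.filter (fun p => decide (p < c))).filter
          (fun p => decide (0 < p) && decide (p < (PySem.Str.len (PySem.Str.slice word none (some c)) : Int))) =
          F.filter (fun p => decide (p < c)) := by
        apply List.filter_eq_self.mpr
        intro p hp
        have h := hmemF' p hp
        simp only [Bool.and_eq_true, decide_eq_true_eq]
        exact ⟨h.1, by rw [hlenpre]; exact h.2⟩
      rw [hG] at hrec
      have hrec2 : decode_splits_py_alt (PySem.Str.slice word none (some c))
          (F.filter (fun p => decide (p < c)))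
          = gParts (PySem.Str.slice word none (some c)) 0
              (scCuts 0 (PySem.List.sorted (F.filter (fun p => decide (p < c))) id)) := by
        rw [hrec]
        by_cases hnil : F.filter (fun p => decide (p < c)) = []
        · rw [if_pos hnil, hnil, (sorted_eq_nil_iff []).mpr rfl]
          simp [gParts, scCuts, slice_zero_none]
        · rw [if_neg hnil]
      have hsortedpw := PySem.List.sorted_pairwise (F.filter (fun p => decide (p < c))) id
      have hmemC' : ∀ x ∈ scCuts 0 (PySem.List.sorted (F.filter (fun p => decide (p < c))) id),
          0 < x ∧ x < c := by
        intro x hx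
        have h1 := (mem_scCuts _ 0 x hsortedpw).1 hx
        have h2 := (PySem.List.mem_sorted _ id false x).1 h1.1
        exact ⟨h1.2, (hmemF' x h2).2⟩
      rw [hrec2, gParts_prefix word c (le_of_lt hc0) _ 0 le_rfl
        (fun x hx => ⟨le_of_lt (hmemC' x hx).1, le_of_lt (hmemC' x hx).2⟩)]
      congr 1
      -- scCuts 0 (sorted F') ++ [c] = scCuts 0 (sorted F)
      have hFpw := PySem.List.sorted_pairwise F id
      apply chain_uniq
      · rw [List.pairwise_append]
        refine ⟨pairwise_lt_scCuts _ 0 hsortedpw, List.pairwise_singleton _ _, ?_⟩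
        intro x hx y hy
        rw [List.mem_singleton] at hy
        subst hy
        exact (hmemC' x hx).2
      · exact pairwise_lt_scCuts _ 0 hFpw
      · intro x
        rw [List.mem_append, List.mem_singleton,
            mem_scCuts _ 0 x hsortedpw, mem_scCuts _ 0 x hFpw,
            PySem.List.mem_sorted, PySem.List.mem_sorted, List.mem_filter]
        constructor
        · rintro (⟨⟨hxF, hxc⟩, hx0⟩ | rfl)
          · exact ⟨hxF, hx0⟩
          · exact ⟨hcF, hc0⟩
        · rintro ⟨hxF, hx0⟩
          by_cases hxc : x < c
          · exact Or.inl ⟨⟨hxF, by simpa using hxc⟩, hx0⟩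
          · exact Or.inr (le_antisymm (hcmax x hxF) (not_lt.mp hxc))

-- ===== VERDICT (by name: the statement is the Claim_ definition above) =====
theorem decode_splits_py_spec : Claim_equal_decode_splits_py := by
  intro word sp _
  unfold Spec_decode_splits_py
  rw [Bchar sp word]
  simp only [decode_splits_py]
  set F := sp.filter (fun pos => decide (0 < pos) && decide (pos < PySem.Str.len word)) with hF
  have hFpos : ∀ p ∈ F, 0 < p := by
    intro p hp; rw [hF, List.mem_filter] at hp
    have := hp.2; simp only [Bool.and_eq_true, decide_eq_true_eq] at this; exact this.1
  have hFlt : ∀ p ∈ F, p < PySem.Str.len word := by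
    intro p hp; rw [hF, List.mem_filter] at hp
    have := hp.2; simp only [Bool.and_eq_true, decide_eq_true_eq] at this; exact this.2
  by_cases hsp : sp = []
  · rw [if_pos hsp]
    have hFnil : F = [] := by rw [hF, hsp]; rfl
    rw [if_pos hFnil]
  · rw [if_neg hsp]
    by_cases hFnil : F = []
    · rw [if_pos hFnil, if_pos ((sorted_eq_nil_iff F).2 hFnil)]
    · rw [if_neg hFnil, if_neg (fun h => hFnil ((sorted_eq_nil_iff F).1 h))]
      obtain ⟨p, hpF⟩ := List.exists_mem_of_ne_nil F hFnil
      have h0n : (0 : Int) < PySem.Str.len word := lt_trans (hFpos p hpF) (hFlt p hpF)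
      have hLlt : ∀ q ∈ PySem.List.sorted F id, q < PySem.Str.len word :=
        fun q hq => hFlt q ((PySem.List.mem_sorted F id false q).1 hq)
      have hA := loopA_eq word (PySem.List.sorted F id) 0 [] hLlt h0n
      rw [hA, List.nil_append, if_neg (gParts_ne_nil word 0 _)]
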